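-- pv_equiv track=rewrite | github.com/kcariglia/madrigal | hapi_server.py | get_last_line
-- ===== SOURCE A (Python) =====
-- def get_last_line(s: str) -> str:
--     # Strip any trailing newlines (\n, \r\n, or combos)
--     i = len(s) - 1
--     while i >= 0 and s[i] in ('\n', '\r'):
--         i -= 1
--     if i < 0:
--         return ''
--     # Now search backwards for the previous newline
--     j = i
--     while j >= 0 and s[j] not in ('\n', '\r'):
--         j -= 1
--     return s[j + 1:i + 1]
-- ===== SOURCE B (Python) =====
-- def get_last_line(s: str) -> str:
--     # one forward pass: track the last completed non-empty line and the current line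
--     last = ''
--     cur = ''
--     for ch in s:
--         if ch in '\r\n':
--             if cur:
--                 last = cur
--                 cur = ''
--         else:
--             cur += ch
--     return cur or last
-- ===== Notes on version B (the rewrite author's own statement) =====
-- stated objective: alternative
-- what changed: Replaces A's two backward index scans and slice with a single forward accumulator pass that keeps the last completed non-empty line and the current line, returning the current line if non-empty else the saved one.
import Mathlib
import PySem

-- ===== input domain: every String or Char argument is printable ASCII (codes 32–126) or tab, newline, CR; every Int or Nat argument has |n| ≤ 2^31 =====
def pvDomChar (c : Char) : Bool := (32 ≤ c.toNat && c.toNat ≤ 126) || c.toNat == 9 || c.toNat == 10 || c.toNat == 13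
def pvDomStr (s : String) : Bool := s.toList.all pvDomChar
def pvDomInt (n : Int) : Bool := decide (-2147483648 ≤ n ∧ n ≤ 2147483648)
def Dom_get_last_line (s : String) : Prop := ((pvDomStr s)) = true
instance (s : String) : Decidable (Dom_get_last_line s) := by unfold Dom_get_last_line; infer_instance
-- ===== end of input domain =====

-- B replaces A's two backward index scans + slice by ONE forward pass that keeps the last
-- completed non-empty line and the current line (objective: alternative decomposition; same O(n)).

-- ===== PORT A =====
-- while i >= 0 and s[i] in ('\n', '\r'): i -= 1
def pvALoop1 (cs : List Char) (i : Int) : Int :=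
  if h : 0 ≤ i ∧ (PySem.List.pyGet? cs i = some '\n' ∨ PySem.List.pyGet? cs i = some '\r') then
    pvALoop1 cs (i - 1)
  else i
termination_by (i + 1).toNat
decreasing_by obtain ⟨h1, -⟩ := h; omega

-- while j >= 0 and s[j] not in ('\n', '\r'): j -= 1
def pvALoop2 (cs : List Char) (j : Int) : Int :=
  if h : 0 ≤ j ∧ ¬ (PySem.List.pyGet? cs j = some '\n' ∨ PySem.List.pyGet? cs j = some '\r') then
    pvALoop2 cs (j - 1)
  else j
termination_by (j + 1).toNat
decreasing_by obtain ⟨h1, -⟩ := h; omega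

def get_last_line (s : String) : String :=
  let cs := s.toList
  let i := pvALoop1 cs (PySem.List.len cs - 1)
  if i < 0 then ""
  else
    let j := pvALoop2 cs i
    String.ofList (PySem.List.slice cs (some (j + 1)) (some (i + 1)))

-- ===== PORT B =====
-- ch in '\r\n'
def pvIsNL (c : Char) : Bool := c == '\r' || c == '\n'

-- the body of B's single for-loop: on a newline promote a non-empty cur to last, else extend cur
def pvStep (ac : List Char × List Char) (ch : Char) : List Char × List Char :=
  if pvIsNL ch then (if ac.2 ≠ [] then (ac.2, []) else ac) else (ac.1, ac.2 ++ [ch])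

def get_last_line_alt (s : String) : String :=
  let st := s.toList.foldl pvStep ([], [])
  -- return cur or last
  if st.2 ≠ [] then String.ofList st.2 else String.ofList st.1

-- ===== PRECONDITION & SPEC =====
def Spec_get_last_line (s : String) (out : String) : Prop := out = get_last_line_alt s
instance (s : String) (out : String) : Decidable (Spec_get_last_line s out) := by unfold Spec_get_last_line; infer_instance

-- ===== CLAIM (what is proved, stated in full; the proofs are below) =====
def Claim_equal_get_last_line : Prop := ∀ (s : String), Dom_get_last_line s → Spec_get_last_line s (get_last_line s)

-- ===== LEMMAS AND PROOFS =====

-- r is the REVERSED input: pvCur r = trailing non-newline run, pvAns r = the answer (last line after stripping trailing newlines)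
def pvCur (r : List Char) : List Char := (r.takeWhile (fun c => !pvIsNL c)).reverse
def pvAns (r : List Char) : List Char := ((r.dropWhile pvIsNL).takeWhile (fun c => !pvIsNL c)).reverse

lemma pv_isNL_iff (c : Char) : pvIsNL c = true ↔ (c = '\n' ∨ c = '\r') := by
  by_cases h1 : c = '\n' <;> by_cases h2 : c = '\r' <;> simp [pvIsNL, h1, h2]

lemma pv_head_dropWhile {p : Char → Bool} {l : List Char} {x : Char}
    (h : (l.dropWhile p).head? = some x) : p x = false := by
  induction l with
  | nil => simp at h
  | cons a t ih =>
    rw [List.dropWhile_cons] at h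
    split at h
    · exact ih h
    · simp_all

-- ---- B-side: the fold invariant ----
lemma pv_fold_inv (cs : List Char) :
    (cs.foldl pvStep ([], [])).2 = pvCur cs.reverse ∧
    (if (cs.foldl pvStep ([], [])).2 ≠ [] then (cs.foldl pvStep ([], [])).2
     else (cs.foldl pvStep ([], [])).1) = pvAns cs.reverse := by
  induction cs using List.reverseRecOn with
  | nil => simp [pvCur, pvAns]
  | append_singleton q c ih =>
    obtain ⟨l, r, hst⟩ : ∃ l r, q.foldl pvStep ([], []) = (l, r) := ⟨_, _, rfl⟩
    rw [hst] at ih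
    obtain ⟨h2, h1⟩ := ih
    simp only at h2 h1
    rw [List.foldl_append, hst]
    simp only [List.foldl_cons, List.foldl_nil, List.reverse_append, List.reverse_cons,
      List.reverse_nil, List.nil_append, List.cons_append]
    by_cases hc : pvIsNL c
    · have hcur : pvCur (c :: q.reverse) = [] := by
        simp [pvCur, hc]
      have hans : pvAns (c :: q.reverse) = pvAns q.reverse := by
        simp [pvAns, hc]
      rw [hcur, hans]
      by_cases hr : r = []
      · subst hr
        simp only [pvStep, hc, if_true, ne_eq, not_true_eq_false, if_false]
        simp only [ne_eq, not_true_eq_false, if_false] at h1 ⊢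
        exact ⟨trivial, h1⟩
      · simp only [pvStep, hc, if_true, if_pos (show r ≠ [] from hr)]
        rw [if_pos (show r ≠ [] from hr)] at h1
        simp only [ne_eq, not_true_eq_false, if_false]
        exact ⟨trivial, h1⟩
    · have hcur : pvCur (c :: q.reverse) = pvCur q.reverse ++ [c] := by
        simp [pvCur, hc]
      have hans : pvAns (c :: q.reverse) = pvCur q.reverse ++ [c] := by
        simp [pvAns, pvCur, hc]
      rw [hcur, hans]
      simp only [pvStep, hc, if_false, Bool.false_eq_true]
      constructor
      · simp [h2]
      · rw [if_pos (by simp)]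
        simp [h2]

-- ---- A-side lemmas (the two backward loops) ----
lemma pv_pyGet?_left (xs ys : List Char) (i : Int) (h0 : 0 ≤ i) (h : i < (xs.length : Int)) :
    PySem.List.pyGet? (xs ++ ys) i = PySem.List.pyGet? xs i := by
  rw [PySem.List.pyGet?_of_nonneg (xs ++ ys) h0, PySem.List.pyGet?_of_nonneg xs h0]
  exact List.getElem?_append_left (by omega)

lemma pv_loop1_append (xs ys : List Char) : ∀ i : Int, i < (xs.length : Int) →
    pvALoop1 (xs ++ ys) i = pvALoop1 xs i := by
  intro i
  induction i using pvALoop1.induct (cs := xs ++ ys) with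
  | case1 i hc ih =>
    intro hlt
    have hg := pv_pyGet?_left xs ys i hc.1 hlt
    have hc' : 0 ≤ i ∧ (PySem.List.pyGet? xs i = some '\n' ∨ PySem.List.pyGet? xs i = some '\r') :=
      ⟨hc.1, by rw [← hg]; exact hc.2⟩
    rw [pvALoop1.eq_def (cs := xs ++ ys), pvALoop1.eq_def (cs := xs), dif_pos hc, dif_pos hc']
    exact ih (by omega)
  | case2 i hc =>
    intro hlt
    have hc' : ¬ (0 ≤ i ∧ (PySem.List.pyGet? xs i = some '\n' ∨ PySem.List.pyGet? xs i = some '\r')) :=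
      fun h => hc ⟨h.1, by rw [pv_pyGet?_left xs ys i h.1 hlt]; exact h.2⟩
    rw [pvALoop1.eq_def (cs := xs ++ ys), pvALoop1.eq_def (cs := xs), dif_neg hc, dif_neg hc']

lemma pv_loop2_append (xs ys : List Char) : ∀ i : Int, i < (xs.length : Int) →
    pvALoop2 (xs ++ ys) i = pvALoop2 xs i := by
  intro i
  induction i using pvALoop2.induct (cs := xs ++ ys) with
  | case1 i hc ih =>
    intro hlt
    have hg := pv_pyGet?_left xs ys i hc.1 hlt
    have hc' : 0 ≤ i ∧ ¬ (PySem.List.pyGet? xs i = some '\n' ∨ PySem.List.pyGet? xs i = some '\r') :=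
      ⟨hc.1, by rw [← hg]; exact hc.2⟩
    rw [pvALoop2.eq_def (cs := xs ++ ys), pvALoop2.eq_def (cs := xs), dif_pos hc, dif_pos hc']
    exact ih (by omega)
  | case2 i hc =>
    intro hlt
    have hc' : ¬ (0 ≤ i ∧ ¬ (PySem.List.pyGet? xs i = some '\n' ∨ PySem.List.pyGet? xs i = some '\r')) := by
      intro h
      exact hc ⟨h.1, by rw [pv_pyGet?_left xs ys i h.1 hlt]; exact h.2⟩
    rw [pvALoop2.eq_def (cs := xs ++ ys), pvALoop2.eq_def (cs := xs), dif_neg hc, dif_neg hc']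

lemma pv_loop1_peel : ∀ (p : List Char), (∀ c ∈ p, c = '\n' ∨ c = '\r') →
    ∀ u : List Char, pvALoop1 (u ++ p) ((u.length : Int) + (p.length : Int) - 1) = pvALoop1 u ((u.length : Int) - 1) := by
  intro p
  induction p using List.reverseRecOn with
  | nil => intro _ u; simp
  | append_singleton q c ih =>
    intro hall u
    have hc : c = '\n' ∨ c = '\r' := hall c (by simp)
    have h1 : u ++ (q ++ [c]) = (u ++ q) ++ [c] := (List.append_assoc u q [c]).symm
    have hidx : (u.length : Int) + ((q ++ [c]).length : Int) - 1 = (((u ++ q).length : Nat) : Int) := by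
      simp [List.length_append]; try push_cast; try ring
    rw [h1, hidx, pvALoop1.eq_def]
    have hget : PySem.List.pyGet? ((u ++ q) ++ [c]) (((u ++ q).length : Nat) : Int) = some c :=
      PySem.List.pyGet?_append_length (u ++ q) [] c
    rw [dif_pos ⟨by positivity, by rw [hget]; simp [hc]⟩]
    rw [pv_loop1_append (u ++ q) [c] _ (by push_cast; omega)]
    have hidx2 : (((u ++ q).length : Nat) : Int) - 1 = (u.length : Int) + (q.length : Int) - 1 := by
      simp [List.length_append]; try push_cast; try ring
    rw [hidx2]
    exact ih (fun c hc => hall c (by simp [hc])) u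

lemma pv_loop2_peel : ∀ (m : List Char), (∀ c ∈ m, ¬ (c = '\n' ∨ c = '\r')) →
    ∀ w : List Char, pvALoop2 (w ++ m) ((w.length : Int) + (m.length : Int) - 1) = pvALoop2 w ((w.length : Int) - 1) := by
  intro m
  induction m using List.reverseRecOn with
  | nil => intro _ w; simp
  | append_singleton q c ih =>
    intro hall w
    have hc : ¬ (c = '\n' ∨ c = '\r') := hall c (by simp)
    have h1 : w ++ (q ++ [c]) = (w ++ q) ++ [c] := (List.append_assoc w q [c]).symm
    have hidx : (w.length : Int) + ((q ++ [c]).length : Int) - 1 = (((w ++ q).length : Nat) : Int) := by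
      simp [List.length_append]; try push_cast; try ring
    rw [h1, hidx, pvALoop2.eq_def]
    have hget : PySem.List.pyGet? ((w ++ q) ++ [c]) (((w ++ q).length : Nat) : Int) = some c :=
      PySem.List.pyGet?_append_length (w ++ q) [] c
    rw [dif_pos ⟨by positivity, by rw [hget]; simpa using hc⟩]
    rw [pv_loop2_append (w ++ q) [c] _ (by push_cast; omega)]
    have hidx2 : (((w ++ q).length : Nat) : Int) - 1 = (w.length : Int) + (q.length : Int) - 1 := by
      simp [List.length_append]; try push_cast; try ring
    rw [hidx2]
    exact ih (fun c hc => hall c (by simp [hc])) w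

lemma pv_loop1_stop : ∀ u : List Char, (∀ x ∈ u.getLast?, ¬ (x = '\n' ∨ x = '\r')) →
    pvALoop1 u ((u.length : Int) - 1) = (u.length : Int) - 1 := by
  intro u
  induction u using List.reverseRecOn with
  | nil => intro _; rw [pvALoop1.eq_def, dif_neg (fun hh => by simp at hh)]
  | append_singleton q c _ =>
    intro hlast
    have hc : ¬ (c = '\n' ∨ c = '\r') := hlast c (by simp)
    have hidx : ((q ++ [c]).length : Int) - 1 = ((q.length : Nat) : Int) := by
      simp [List.length_append]; try push_cast; try ring
    rw [pvALoop1.eq_def, dif_neg]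
    rintro ⟨-, h2⟩
    rw [hidx, PySem.List.pyGet?_append_length q [] c] at h2
    exact hc (by simpa using h2)

lemma pv_loop2_stop : ∀ w : List Char, (∀ x ∈ w.getLast?, x = '\n' ∨ x = '\r') →
    pvALoop2 w ((w.length : Int) - 1) = (w.length : Int) - 1 := by
  intro w
  induction w using List.reverseRecOn with
  | nil => intro _; rw [pvALoop2.eq_def, dif_neg (fun hh => by simp at hh)]
  | append_singleton q c _ =>
    intro hlast
    have hc : c = '\n' ∨ c = '\r' := hlast c (by simp)
    have hidx : ((q ++ [c]).length : Int) - 1 = ((q.length : Nat) : Int) := by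
      simp [List.length_append]; try push_cast; try ring
    rw [pvALoop2.eq_def, dif_neg]
    rintro ⟨-, h2⟩
    rw [hidx, PySem.List.pyGet?_append_length q [] c] at h2
    exact h2 (by simpa using hc)

-- A returns the maximal non-newline run that precedes the trailing newline run
lemma pv_A_eq (s : String) : get_last_line s = String.ofList (pvAns s.toList.reverse) := by
  simp only [get_last_line]
  set cs := s.toList with hcs
  set u := (cs.reverse.dropWhile pvIsNL).reverse with hu
  set p := (cs.reverse.takeWhile pvIsNL).reverse with hp
  have hcsUP : cs = u ++ p.reverse.reverse := by
    rw [hu, hp, List.reverse_reverse, ← List.reverse_append, List.takeWhile_append_dropWhile,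
      List.reverse_reverse]
  rw [List.reverse_reverse] at hcsUP
  have hpNL : ∀ c ∈ p, c = '\n' ∨ c = '\r' := by
    intro c hc
    rw [hp, List.mem_reverse] at hc
    exact (pv_isNL_iff c).mp (List.mem_takeWhile_imp hc)
  have huLast : ∀ x ∈ u.getLast?, ¬ (x = '\n' ∨ x = '\r') := by
    intro x hx
    rw [hu, List.getLast?_reverse] at hx
    have hthis : pvIsNL x = false := pv_head_dropWhile (Option.mem_def.mp hx)
    intro hcon
    rw [(pv_isNL_iff x).mpr hcon] at hthis
    exact Bool.true_eq_false.mp hthis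
  set m := (u.reverse.takeWhile (fun c => ! pvIsNL c)).reverse with hm
  set w := (u.reverse.dropWhile (fun c => ! pvIsNL c)).reverse with hw
  have huWM : u = w ++ m := by
    rw [hm, hw, ← List.reverse_append, List.takeWhile_append_dropWhile, List.reverse_reverse]
  have hmAns : String.ofList m = String.ofList (pvAns cs.reverse) := by
    rw [hm, hu, List.reverse_reverse, pvAns]
  have hmNoNL : ∀ c ∈ m, ¬ (c = '\n' ∨ c = '\r') := by
    intro c hc hcon
    rw [hm, List.mem_reverse] at hc
    have hthis : (! pvIsNL c) = true := List.mem_takeWhile_imp (p := fun c => ! pvIsNL c) hc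
    rw [Bool.not_eq_true'] at hthis
    rw [(pv_isNL_iff c).mpr hcon] at hthis
    exact Bool.true_eq_false.mp hthis
  have hwLast : ∀ x ∈ w.getLast?, x = '\n' ∨ x = '\r' := by
    intro x hx
    rw [hw, List.getLast?_reverse] at hx
    have hthis : (! pvIsNL x) = false := pv_head_dropWhile (Option.mem_def.mp hx)
    rw [Bool.not_eq_false'] at hthis
    exact (pv_isNL_iff x).mp hthis
  have hlenA : PySem.List.len cs - 1 = (u.length : Int) + (p.length : Int) - 1 := by
    rw [PySem.List.len_eq, hcsUP]; push_cast [List.length_append]; ring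
  have hi : pvALoop1 cs (PySem.List.len cs - 1) = (u.length : Int) - 1 := by
    rw [hlenA, hcsUP, pv_loop1_peel p hpNL u, pv_loop1_stop u huLast]
  rw [hi]
  by_cases hu0 : u = []
  · rw [if_pos (by rw [hu0]; simp)]
    have hm0 : m = [] := by
      have := huWM
      rw [hu0] at this
      exact (List.append_eq_nil_iff.mp this.symm).2
    rw [← hmAns, hm0]
  · have hulen : 1 ≤ u.length := List.length_pos_iff.mpr hu0
    rw [if_neg (by omega)]
    have hj : pvALoop2 cs ((u.length : Int) - 1) = (w.length : Int) - 1 := by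
      rw [hcsUP, pv_loop2_append u p _ (by omega)]
      rw [huWM]
      rw [show (((w ++ m).length : Nat) : Int) - 1 = (w.length : Int) + (m.length : Int) - 1 from by
        push_cast [List.length_append]; ring]
      rw [pv_loop2_peel m hmNoNL w, pv_loop2_stop w hwLast]
    rw [hj]
    have e1 : (w.length : Int) - 1 + 1 = ((w.length : Nat) : Int) := by ring
    have e2 : (u.length : Int) - 1 + 1 = ((u.length : Nat) : Int) := by ring
    have hslice : PySem.List.slice cs (some ((w.length : Int) - 1 + 1)) (some ((u.length : Int) - 1 + 1)) = m := by
      rw [e1, e2, PySem.List.slice_natCast]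
      conv_lhs => rw [hcsUP, huWM, List.append_assoc]
      rw [List.drop_left]
      rw [show (w ++ m).length - w.length = m.length from by rw [List.length_append]; omega]
      rw [List.take_left]
    rw [hslice]
    exact hmAns

theorem pv_main (s : String) : get_last_line s = get_last_line_alt s := by
  rw [pv_A_eq]
  simp only [get_last_line_alt]
  obtain ⟨-, h1⟩ := pv_fold_inv s.toList
  by_cases hne : (s.toList.foldl pvStep ([], [])).2 ≠ []
  · rw [if_pos hne] at h1 ⊢
    rw [h1]
  · rw [if_neg hne] at h1 ⊢
    rw [h1]

-- ===== VERDICT (by name: the statement is the Claim_ definition above) =====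
theorem get_last_line_spec : Claim_equal_get_last_line := by
  intro s _
  unfold Spec_get_last_line
  exact pv_main s
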